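-- pv_equiv track=rewrite | github.com/HwangHanJae/coding_test_pratice | 백준/수학/에라토스테네스의 체/2960.py | solve
-- ===== SOURCE A (Python) =====
-- def solve(n):
--   result = []
--   for i in range(2, n+1):
--     j = 1
--     while i * j <= n:
--       if i * j in result:
--         pass
--       else:
--         result.append(i*j)
--       j+=1
--   return result
-- ===== SOURCE B (Python) =====
-- def solve(n):
--   crossed = [False] * (n + 1)
--   result = []
--   for i in range(2, n + 1):
--     if not crossed[i]:
--       j = 1
--       while i * j <= n:
--         if not crossed[i * j]:
--           crossed[i * j] = True
--           result.append(i * j)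
--         j += 1
--   return result
-- ===== Notes on version B (the rewrite author's own statement) =====
-- stated objective: faster
-- what changed: B is the true sieve of Eratosthenes: a boolean crossed array gives O(1) membership, and an outer guard 'if not crossed[i]' skips composite i entirely (their multiples contribute nothing in A), replacing A's linear list-membership scan inside a loop started from every i.
import Mathlib
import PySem

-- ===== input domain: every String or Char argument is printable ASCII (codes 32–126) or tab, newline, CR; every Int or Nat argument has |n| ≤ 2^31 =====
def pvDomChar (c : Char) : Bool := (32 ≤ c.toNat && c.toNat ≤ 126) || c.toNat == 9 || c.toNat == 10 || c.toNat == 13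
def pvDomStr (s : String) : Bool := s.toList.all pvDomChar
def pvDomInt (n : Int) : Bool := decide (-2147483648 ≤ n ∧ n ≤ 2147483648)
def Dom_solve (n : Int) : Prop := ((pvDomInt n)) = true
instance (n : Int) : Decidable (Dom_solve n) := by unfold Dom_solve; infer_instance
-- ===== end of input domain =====

-- B replaces A's scan-from-every-i with a true Eratosthenes sieve: a boolean crossed
-- array for O(1) membership plus an outer guard skipping already-crossed (composite) i.

-- ===== PORT A =====
-- the 'while i * j <= n' loop of A, with fuel (fuel n.toNat is always sufficient, see proofs)
def innerA (n i : Int) : Nat → Int → List Int → List Int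
  | 0, _, result => result
  | f + 1, j, result =>
    if i * j ≤ n then
      innerA n i f (j + 1) (if i * j ∈ result then result else result ++ [i * j])
    else result

def solve (n : Int) : List Int :=
  (PySem.List.pyRange 2 (n + 1) 1).foldl (fun result i => innerA n i n.toNat 1 result) []

-- ===== PORT B =====
-- crossed = [False]*(n+1) is a List Bool; crossed[m] read is List.getD m.toNat,
-- crossed[m] = True is List.set m.toNat — exact here since every index used is in [2, n].
def innerB (n i : Int) : Nat → Int → List Bool → List Int → List Bool × List Int
  | 0, _, crossed, result => (crossed, result)
  | f + 1, j, crossed, result =>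
    if i * j ≤ n then
      if crossed.getD (i * j).toNat false then
        innerB n i f (j + 1) crossed result
      else
        innerB n i f (j + 1) (crossed.set (i * j).toNat true) (result ++ [i * j])
    else (crossed, result)

def solve_alt (n : Int) : List Int :=
  ((PySem.List.pyRange 2 (n + 1) 1).foldl
    (fun st i => if st.1.getD i.toNat false then st else innerB n i n.toNat 1 st.1 st.2)
    (List.replicate (n + 1).toNat false, [])).2

-- ===== PRECONDITION & SPEC =====
def Spec_solve (n : Int) (out : List Int) : Prop := out = solve_alt n
instance (n : Int) (out : List Int) : Decidable (Spec_solve n out) := by unfold Spec_solve; infer_instance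

-- ===== CLAIM (what is proved, stated in full; the proofs are below) =====
def Claim_equal_solve : Prop := ∀ (n : Int), Dom_solve n → Spec_solve n (solve n)

-- ===== LEMMAS AND PROOFS =====

-- membership in A's inner result: old element or a fresh multiple i*k, j ≤ k, i*k ≤ n
theorem innerA_mem (n i : Int) (f : Nat) :
    ∀ (j : Int) (r : List Int), ∀ m ∈ innerA n i f j r,
      m ∈ r ∨ ∃ k, j ≤ k ∧ m = i * k ∧ i * k ≤ n := by
  induction f with
  | zero => intro j r m hm; exact Or.inl hm
  | succ f ih =>
    intro j r m hm
    simp only [innerA] at hm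
    split at hm
    · rcases ih (j+1) _ m hm with h | ⟨k, hk, hmk, hkn⟩
      · split at h
        · exact Or.inl h
        · rcases List.mem_append.mp h with h | h
          · exact Or.inl h
          · simp at h; exact Or.inr ⟨j, le_refl _, h, by omega⟩
      · exact Or.inr ⟨k, by omega, hmk, hkn⟩
    · exact Or.inl hm

-- monotonicity
theorem innerA_mono (n i : Int) (f : Nat) :
    ∀ (j : Int) (r : List Int), ∀ m ∈ r, m ∈ innerA n i f j r := by
  induction f with
  | zero => intro j r m hm; exact hm
  | succ f ih =>
    intro j r m hm
    simp only [innerA]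
    split
    · apply ih; split
      · exact hm
      · exact List.mem_append_left _ hm
    · exact hm

-- completeness: with enough fuel every multiple i*k ≤ n (k ≥ j) ends up in the result
theorem innerA_complete (n i : Int) (hi : 1 ≤ i) (f : Nat) :
    ∀ (j : Int) (r : List Int), n + 1 ≤ i * j + f →
      ∀ k, j ≤ k → i * k ≤ n → i * k ∈ innerA n i f j r := by
  induction f with
  | zero =>
    intro j r hfuel k hjk hkn
    exfalso
    have : i * j ≤ i * k := by
      apply mul_le_mul_of_nonneg_left hjk; omega
    omega
  | succ f ih =>
    intro j r hfuel k hjk hkn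
    have hij : i * j ≤ n := by
      have : i * j ≤ i * k := by apply mul_le_mul_of_nonneg_left hjk; omega
      omega
    simp only [innerA, if_pos hij]
    rcases eq_or_lt_of_le hjk with h | h
    · -- k = j : i*j lands in the list now, then stays by monotonicity
      subst h
      apply innerA_mono
      split
      · assumption
      · exact List.mem_append_right _ (by simp)
    · have hexp : i * (j + 1) = i * j + i := by ring
      apply ih (j+1) _ (by push_cast at hfuel ⊢; omega) k (by omega) hkn

-- if every remaining multiple is already present, the inner loop is the identity
theorem innerA_skip (n i : Int) (f : Nat) :
    ∀ (j : Int) (r : List Int), (∀ k, j ≤ k → i * k ≤ n → i * k ∈ r) →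
      innerA n i f j r = r := by
  induction f with
  | zero => intro j r _; rfl
  | succ f ih =>
    intro j r hall
    simp only [innerA]
    split
    · rename_i hij
      rw [if_pos (hall j (le_refl _) hij)]
      exact ih (j+1) r (fun k hk hkn => hall k (by omega) hkn)
    · rfl

-- the crossed-array flag seen as a predicate
def flag (c : List Bool) (m : Int) : Bool := c.getD m.toNat false

theorem flag_set (c : List Bool) (n x m : Int) (hc : c.length = (n+1).toNat)
    (hx0 : 0 ≤ x) (hxn : x ≤ n) (hm0 : 0 ≤ m) (hmn : m ≤ n) :
    flag (c.set x.toNat true) m = (if m = x then true else flag c m) := by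
  unfold flag
  have hxlen : x.toNat < c.length := by omega
  by_cases h : m = x
  · subst h
    simp [List.getD_eq_getElem?_getD, hxlen]
  · have : m.toNat ≠ x.toNat := by omega
    simp [List.getD_eq_getElem?_getD, List.getElem?_set_ne (by omega : x.toNat ≠ m.toNat), h]

-- B's inner loop tracks A's: same result list, and the flags keep meaning "is in the result"
theorem innerB_rel (n i : Int) (hi : 2 ≤ i) (f : Nat) :
    ∀ (j : Int) (c : List Bool) (r : List Int), 1 ≤ j →
      c.length = (n+1).toNat →
      (∀ m : Int, 0 ≤ m → m ≤ n → (flag c m = true ↔ m ∈ r)) →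
      (innerB n i f j c r).2 = innerA n i f j r ∧
      (innerB n i f j c r).1.length = (n+1).toNat ∧
      (∀ m : Int, 0 ≤ m → m ≤ n → (flag (innerB n i f j c r).1 m = true ↔ m ∈ (innerB n i f j c r).2)) := by
  induction f with
  | zero => intro j c r _ hc hfl; exact ⟨rfl, hc, hfl⟩
  | succ f ih =>
    intro j c r hj hc hfl
    have hij0 : 0 ≤ i * j := mul_nonneg (by omega) (by omega)
    simp only [innerB, innerA]
    split
    · rename_i hijn
      have hflij : c.getD (i * j).toNat false = decide (i * j ∈ r) := by
        have h := hfl (i * j) hij0 hijn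
        by_cases hm : i * j ∈ r
        · simp only [hm, decide_true]; exact h.mpr hm
        · simp only [hm, decide_false]
          cases hb : flag c (i * j) with
          | false => exact hb
          | true => exact absurd (h.mp hb) hm
      by_cases hmem : i * j ∈ r
      · rw [hflij]
        simp only [hmem, decide_true, if_true]
        exact ih (j+1) c r (by omega) hc hfl
      · rw [hflij]
        simp only [hmem, decide_false, Bool.false_eq_true, if_false]
        apply ih (j+1) _ _ (by omega) (by simp [hc])
        intro m hm0 hmn
        rw [flag_set c n (i*j) m hc hij0 hijn hm0 hmn]
        by_cases h : m = i * j
        · simp [h]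
        · rw [if_neg h, hfl m hm0 hmn]
          simp [h]
    · exact ⟨rfl, hc, hfl⟩

-- the combined outer-loop invariant
def SieveInv (n i : Int) (c : List Bool) (r : List Int) : Prop :=
  c.length = (n+1).toNat ∧
  (∀ m ∈ r, 2 ≤ m ∧ m ≤ n) ∧
  (∀ m : Int, 0 ≤ m → m ≤ n → (flag c m = true ↔ m ∈ r)) ∧
  (∀ p, 2 ≤ p → p < i → ∀ k, 1 ≤ k → p * k ≤ n → p * k ∈ r) ∧
  (∀ m ∈ r, ∃ p k, 2 ≤ p ∧ p < i ∧ 1 ≤ k ∧ m = p * k)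

-- main outer-loop equivalence, by induction on the remaining range
theorem outer_rel (n i : Int) (c : List Bool) (r : List Int) (hi : 2 ≤ i)
    (hinv : SieveInv n i c r) :
    (PySem.List.pyRange i (n+1) 1).foldl (fun result i => innerA n i n.toNat 1 result) r =
    ((PySem.List.pyRange i (n+1) 1).foldl
      (fun st i => if st.1.getD i.toNat false then st else innerB n i n.toNat 1 st.1 st.2)
      (c, r)).2 := by
  obtain ⟨hc, hrange, hfl, hC1, hC2⟩ := hinv
  by_cases hend : n + 1 ≤ i
  · rw [PySem.List.pyRange_one_eq_nil hend]; rfl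
  · have hin : i ≤ n := by omega
    rw [PySem.List.pyRange_one_cons (by omega)]
    simp only [List.foldl_cons]
    by_cases hmem : i ∈ r
    · -- i already crossed out: A's inner pass adds nothing, B skips it outright
      obtain ⟨p, k, hp2, hpi, hk1, hpk⟩ := hC2 i hmem
      have hskip : ∀ k', 1 ≤ k' → i * k' ≤ n → i * k' ∈ r := by
        intro k' hk' hkn'
        have heq : i * k' = p * (k * k') := by rw [hpk]; ring
        rw [heq]
        exact hC1 p hp2 hpi (k * k') (by nlinarith) (by omega)
      rw [innerA_skip n i _ 1 r (fun k' hk' => hskip k' hk')]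
      have hcond : c.getD i.toNat false = true := by
        have h := (hfl i (by omega) hin).mpr hmem
        exact h
      simp only [hcond, if_true]
      apply outer_rel n (i+1) c r (by omega)
      refine ⟨hc, hrange, hfl, ?_, ?_⟩
      · intro p' hp'2 hp'i k' hk' hkn'
        rcases lt_or_ge p' i with h | h
        · exact hC1 p' hp'2 h k' hk' hkn'
        · have : p' = i := by omega
          subst this; exact hskip k' hk' hkn'
      · intro m hm
        obtain ⟨p', k', h1, h2, h3, h4⟩ := hC2 m hm
        exact ⟨p', k', h1, by omega, h3, h4⟩
    · -- i not yet crossed: both run the full inner pass over multiples of i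
      have hcond : c.getD i.toNat false = false := by
        have h := hfl i (by omega) hin
        cases hb : flag c i with
        | false => exact hb
        | true => exact absurd (h.mp hb) hmem
      simp only [hcond, Bool.false_eq_true, if_false]
      obtain ⟨heq, hlen, hfl'⟩ := innerB_rel n i hi n.toNat 1 c r (le_refl _) hc hfl
      have hfuel : n + 1 ≤ i * 1 + (n.toNat : Int) := by omega
      have hAmem := innerA_mem n i n.toNat 1 r
      rw [← heq]
      apply outer_rel n (i+1) (innerB n i n.toNat 1 c r).1 _ (by omega)
      refine ⟨hlen, ?_, hfl', ?_, ?_⟩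
      · intro m hm
        rw [heq] at hm
        rcases hAmem m hm with h | ⟨k, hk, hmk, hkn⟩
        · exact hrange m h
        · constructor
          · have : i * 1 ≤ i * k := by apply mul_le_mul_of_nonneg_left hk; omega
            omega
          · omega
      · intro p hp2 hpi k hk hkn
        rw [heq]
        rcases lt_or_ge p i with h | h
        · exact innerA_mono n i n.toNat 1 r _ (hC1 p hp2 h k hk hkn)
        · have hpe : p = i := by omega
          rw [hpe] at hkn ⊢
          exact innerA_complete n i (by omega) n.toNat 1 r hfuel k hk hkn
      · intro m hm
        rw [heq] at hm
        rcases hAmem m hm with h | ⟨k, hk, hmk, hkn⟩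
        · obtain ⟨p', k', h1, h2, h3, h4⟩ := hC2 m h
          exact ⟨p', k', h1, by omega, h3, h4⟩
        · exact ⟨i, k, hi, by omega, by omega, hmk⟩
  termination_by (n + 1 - i).toNat
  decreasing_by all_goals omega

theorem flag_replicate (n : Int) (m : Int) :
    flag (List.replicate (n+1).toNat false) m = false := by
  unfold flag
  simp [List.getD_eq_getElem?_getD, List.getElem?_replicate]
  split <;> rfl

-- ===== VERDICT (by name: the statement is the Claim_ definition above) =====
theorem solve_spec : Claim_equal_solve := by
  intro n _
  unfold Spec_solve solve solve_alt
  apply outer_rel n 2 _ [] (le_refl _)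
  refine ⟨by simp, by simp, ?_, by omega, by simp⟩
  intro m _ _
  simp [flag_replicate]
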